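-- pv_equiv track=rewrite | github.com/printjin-gmailcom/2024--Code_States-SSU-Coding_Test | image15.py | solution
-- ===== SOURCE A (Python) =====
-- def solution(arr, k):
-- 	cols = len(arr[0])
-- 	rows = len(arr)
--
-- 	if k == 0:
-- 		return arr
-- 	if cols == 1 and rows == 1:
-- 		return arr
--
-- 	if cols >= rows:
-- 		answer = [[] for _ in range(rows)]
--
-- 		for i in range(rows):
-- 			for j in range(cols//2):
-- 				answer[i].append(max(arr[i][2*j], arr[i][2*j+1]))
--
-- 	else:
-- 		answer = [[] for _ in range(rows//2)]
--
-- 		for i in range(cols):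
-- 			for j in range(rows//2):
-- 				answer[j].append(min(arr[2*j][i], arr[2*j+1][i]))
--
-- 	return solution(answer, k-1)
-- ===== SOURCE B (Python) =====
-- def _pairwise(xs, f):
--     if len(xs) < 2:
--         return []
--     return [f(xs[0], xs[1])] + _pairwise(xs[2:], f)
--
--
-- def solution(arr, k):
--     while True:
--         cols = len(arr[0])
--         rows = len(arr)
--         if k == 0 or (cols == 1 and rows == 1):
--             return arr
--         if cols >= rows:
--             arr = [_pairwise(row, max) for row in arr]
--         else:
--             arr = _pairwise(arr, lambda r0, r1: [min(a, b) for a, b in zip(r0, r1)])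
--         k -= 1
-- ===== Notes on version B (the rewrite author's own statement) =====
-- stated objective: simpler
-- what changed: Replaces the tail recursion by an iterative loop and replaces the index-based nested loops that append into a preallocated answer by direct pairwise reductions (row-max via an adjacent-pair helper on each row, column-min via the same helper on the list of rows plus zip); Pre_ excludes empty grids, where A raises IndexError, and, for k != 0, non-rectangular grids, where A usually raises IndexError mid-recursion and where, if it does return, how much of an uneven row to keep is an unspecified corner on which A's fixed cols=len(arr[0]) indexing and B's zip truncation are both defensible.
-- outside the precondition, e.g. on solution([[7], [1, 2], [5, 3], [6, 4]], 1): A returns [[1], [5]], B returns [[1], [5, 3]]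
import Mathlib
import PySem

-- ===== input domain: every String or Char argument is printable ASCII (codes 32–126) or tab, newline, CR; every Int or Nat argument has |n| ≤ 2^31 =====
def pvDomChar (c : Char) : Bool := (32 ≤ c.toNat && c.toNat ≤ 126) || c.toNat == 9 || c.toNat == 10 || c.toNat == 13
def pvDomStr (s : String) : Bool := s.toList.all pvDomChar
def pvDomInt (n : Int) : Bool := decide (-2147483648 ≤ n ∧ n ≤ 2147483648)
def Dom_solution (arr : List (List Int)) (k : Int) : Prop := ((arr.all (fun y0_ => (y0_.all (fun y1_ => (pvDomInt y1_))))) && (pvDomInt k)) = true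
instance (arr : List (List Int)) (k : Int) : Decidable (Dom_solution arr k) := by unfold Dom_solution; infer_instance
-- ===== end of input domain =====

-- B replaces A's recursion + index-based append loops by an iterative loop with
-- adjacent-pair reductions (same cost); the claim is about the return value (neither mutates).

-- ===== PORT A =====
-- the answer[i].append(max(arr[i][2*j], arr[i][2*j+1])) nested loops of the cols >= rows branch
def stepRowA (arr : List (List Int)) (rows cols : Nat) : List (List Int) :=
  (List.range rows).foldl (fun ans i =>
    (List.range (cols / 2)).foldl (fun ans j =>
      ans.set i ((ans.getD i []) ++
        [max (PySem.List.pyGetD (PySem.List.pyGetD arr (i : Int) []) ((2 * j : Nat) : Int) 0)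
             (PySem.List.pyGetD (PySem.List.pyGetD arr (i : Int) []) ((2 * j + 1 : Nat) : Int) 0)])) ans)
    ((List.range rows).map (fun _ => []))


-- the answer[j].append(min(arr[2*j][i], arr[2*j+1][i])) nested loops of the else branch
def stepColA (arr : List (List Int)) (rows cols : Nat) : List (List Int) :=
  (List.range cols).foldl (fun ans (i : Nat) =>
    (List.range (rows / 2)).foldl (fun ans j =>
      ans.set j ((ans.getD j []) ++
        [min (PySem.List.pyGetD (PySem.List.pyGetD arr ((2 * j : Nat) : Int) []) (i : Int) 0)
             (PySem.List.pyGetD (PySem.List.pyGetD arr ((2 * j + 1 : Nat) : Int) []) (i : Int) 0)])) ans)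
    ((List.range (rows / 2)).map (fun _ => []))


-- the recursion, made total with fuel (fuel only makes it total; inputs satisfying Pre_ never exhaust it)
def solutionFuel : Nat → List (List Int) → Int → List (List Int)
  | 0, arr, _ => arr
  | fuel + 1, arr, k =>
    let cols := (PySem.List.pyGetD arr 0 []).length
    let rows := arr.length
    if k = 0 then arr
    else if cols = 1 ∧ rows = 1 then arr
    else if cols ≥ rows then solutionFuel fuel (stepRowA arr rows cols) (k - 1)
    else solutionFuel fuel (stepColA arr rows cols) (k - 1)


def solution (arr : List (List Int)) (k : Int) : List (List Int) :=
  solutionFuel (arr.length + (PySem.List.pyGetD arr 0 []).length + k.natAbs + 1) arr k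

-- ===== PORT B =====
-- _pairwise(xs, f): combine adjacent pairs, dropping a leftover odd element
def pairwise {α β : Type} (f : α → α → β) : List α → List β
  | a :: b :: rest => f a b :: pairwise f rest
  | _ => []


-- the while-True loop, made total with the same fuel
def solutionAltFuel : Nat → List (List Int) → Int → List (List Int)
  | 0, arr, _ => arr
  | fuel + 1, arr, k =>
    let cols := (PySem.List.pyGetD arr 0 []).length
    let rows := arr.length
    if k = 0 ∨ (cols = 1 ∧ rows = 1) then arr
    else if cols ≥ rows then
      solutionAltFuel fuel (arr.map (fun row => pairwise (fun a b => max a b) row)) (k - 1)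
    else
      solutionAltFuel fuel (pairwise (fun r0 r1 => List.zipWith (fun a b => min a b) r0 r1) arr) (k - 1)

def solution_alt (arr : List (List Int)) (k : Int) : List (List Int) :=
  solutionAltFuel (arr.length + (PySem.List.pyGetD arr 0 []).length + k.natAbs + 1) arr k

-- ===== PRECONDITION & SPEC =====
-- Pre_ excludes empty grids, where A raises IndexError on arr[0], and, for k ≠ 0,
-- non-rectangular (or empty-row) grids, where A usually raises IndexError mid-recursion and
-- where, if it does return, how much of an uneven row to keep is an unspecified corner on
-- which A's fixed cols = len(arr[0]) indexing and B's zip truncation are both defensible.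
def Pre_solution (arr : List (List Int)) (k : Int) : Prop :=
  arr ≠ [] ∧ (k = 0 ∨ ((∀ row ∈ arr, row.length = (arr.headD []).length) ∧ 1 ≤ (arr.headD []).length))
instance (arr : List (List Int)) (k : Int) : Decidable (Pre_solution arr k) := by
  unfold Pre_solution; infer_instance

def pvWitness_solution : List (List Int) × Int := ([[1, 2, 3], [4, 5, 6]], 2)

def Spec_solution (arr : List (List Int)) (k : Int) (out : List (List Int)) : Prop := out = solution_alt arr k
instance (arr : List (List Int)) (k : Int) (out : List (List Int)) : Decidable (Spec_solution arr k out) := by unfold Spec_solution; infer_instance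

-- ===== CLAIM (what is proved, stated in full; the proofs are below) =====
def Claim_equal_solution : Prop := ∀ (arr : List (List Int)) (k : Int), Dom_solution arr k → Pre_solution arr k → Spec_solution arr k (solution arr k)

-- ===== LEMMAS AND PROOFS =====
theorem list_eq_map_range {α : Type} (d : α) (xs : List α) :
    (List.range xs.length).map (fun j => xs.getD j d) = xs := by
  induction xs with
  | nil => simp
  | cons a rest ih =>
    simp only [List.length_cons, List.range_succ_eq_map, List.map_cons, List.map_map]
    simp only [List.getD_cons_zero]
    refine congrArg (a :: ·) ?_
    simpa [Function.comp] using ih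

theorem set_map_range {α : Type} (n m : Nat) (f : Nat → α) (v : α) :
    ((List.range n).map f).set m v
      = (List.range n).map (fun j => if j = m then v else f j) := by
  apply List.ext_getElem
  · simp
  · intro i h1 h2
    simp [List.getElem_set, eq_comm]

theorem getD_map_range' {α : Type} (n j : Nat) (f : Nat → α) (d : α) (h : j < n) :
    ((List.range n).map f).getD j d = f j := by
  rw [List.getD_eq_getElem _ _ (by simpa using h)]
  simp

theorem getD_mem' {α : Type} (l : List α) (n : Nat) (d : α) (h : n < l.length) :
    l.getD n d ∈ l := by
  rw [List.getD_eq_getElem _ _ h]; exact List.getElem_mem h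

theorem pairwise_eq_map_range {α β : Type} (f : α → α → β) (d : α) (xs : List α) :
    pairwise f xs
      = (List.range (xs.length / 2)).map (fun j => f (xs.getD (2 * j) d) (xs.getD (2 * j + 1) d)) := by
  match xs with
  | [] => simp [pairwise]
  | [a] => simp [pairwise]
  | a :: b :: rest =>
    have ih := pairwise_eq_map_range f d rest
    have hl : (a :: b :: rest).length / 2 = rest.length / 2 + 1 := by simp; omega
    rw [hl, List.range_succ_eq_map, List.map_cons, List.map_map]
    show f a b :: pairwise f rest = _
    refine congrArg (f a b :: ·) ?_
    rw [ih]
    apply List.map_congr_left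
    intro j _
    simp [Function.comp, Nat.mul_succ]

theorem pairwise_length {α β : Type} (f : α → α → β) (d : α) (xs : List α) :
    (pairwise f xs).length = xs.length / 2 := by
  rw [pairwise_eq_map_range f d xs]; simp

theorem zipWith_eq_map_range (f : Int → Int → Int) (r0 r1 : List Int) (n : Nat)
    (h0 : r0.length = n) (h1 : r1.length = n) :
    List.zipWith f r0 r1 = (List.range n).map (fun i => f (r0.getD i 0) (r1.getD i 0)) := by
  induction r0 generalizing r1 n with
  | nil => simp at h0; subst h0; simp
  | cons a r0 ih =>
    cases r1 with
    | nil => simp at h0 h1; omega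
    | cons b r1 =>
      cases n with
      | zero => simp at h0
      | succ m =>
        simp only [List.zipWith_cons_cons]
        rw [List.range_succ_eq_map, List.map_cons, List.map_map]
        refine congrArg (f a b :: ·) ?_
        rw [ih r1 m (by simpa using h0) (by simpa using h1)]
        apply List.map_congr_left
        intro j _
        simp [Function.comp]

theorem foldl_set_same (m : Nat) (g : Nat → Int) (ans : List (List Int)) (i : Nat)
    (hi : i < ans.length) :
    (List.range m).foldl (fun a j => a.set i ((a.getD i []) ++ [g j])) ans
      = ans.set i ((ans.getD i []) ++ (List.range m).map g) := by
  induction m with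
  | zero =>
    simp only [List.range_zero, List.foldl_nil, List.map_nil, List.append_nil]
    rw [List.getD_eq_getElem _ _ hi]
    exact (List.set_getElem_self hi).symm
  | succ m ih =>
    rw [List.range_succ, List.foldl_append, ih, List.foldl_cons, List.foldl_nil]
    have h2 : (ans.set i (ans.getD i [] ++ (List.range m).map g)).getD i []
        = ans.getD i [] ++ (List.range m).map g := by
      rw [List.getD_eq_getElem _ _ (by simpa using hi)]
      simp
    rw [h2, List.set_set]
    simp

theorem foldl_set_each_gen (h : Nat → Int) (m : Nat) (ans : List (List Int)) (hm : m ≤ ans.length) :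
    (List.range m).foldl (fun a j => a.set j ((a.getD j []) ++ [h j])) ans
      = (List.range ans.length).map (fun j => if j < m then ans.getD j [] ++ [h j] else ans.getD j []) := by
  induction m with
  | zero =>
    simp only [List.range_zero, List.foldl_nil, Nat.not_lt_zero, if_false]
    exact (list_eq_map_range [] ans).symm
  | succ m ih =>
    rw [List.range_succ, List.foldl_append, ih (by omega), List.foldl_cons, List.foldl_nil]
    rw [getD_map_range' _ _ _ _ (by omega)]
    rw [set_map_range]
    apply List.map_congr_left
    intro j hj
    simp only [List.mem_range] at hj
    split_ifs with h1 h2 h3 h4 h5 <;> simp_all <;> omega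

theorem foldl_set_each (m : Nat) (h : Nat → Int) (f : Nat → List Int) :
    (List.range m).foldl (fun a j => a.set j ((a.getD j []) ++ [h j])) ((List.range m).map f)
      = (List.range m).map (fun j => f j ++ [h j]) := by
  rw [foldl_set_each_gen h m _ (by simp)]
  simp only [List.length_map, List.length_range]
  apply List.map_congr_left
  intro j hj
  simp only [List.mem_range] at hj
  rw [getD_map_range' _ _ _ _ hj]
  simp [hj]

theorem stepRow_outer (arr : List (List Int)) (cols t : Nat) (ht : t ≤ arr.length) :
    (List.range t).foldl (fun ans i =>
      (List.range (cols / 2)).foldl (fun ans j =>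
        ans.set i ((ans.getD i []) ++
          [max (PySem.List.pyGetD (PySem.List.pyGetD arr (i : Int) []) ((2 * j : Nat) : Int) 0)
               (PySem.List.pyGetD (PySem.List.pyGetD arr (i : Int) []) ((2 * j + 1 : Nat) : Int) 0)])) ans)
      ((List.range arr.length).map (fun _ => []))
    = (List.range arr.length).map (fun i => if i < t then
        (List.range (cols / 2)).map (fun j =>
          max ((arr.getD i []).getD (2 * j) 0) ((arr.getD i []).getD (2 * j + 1) 0)) else []) := by
  induction t with
  | zero => simp
  | succ t ih =>
    rw [List.range_succ, List.foldl_append, ih (by omega), List.foldl_cons, List.foldl_nil]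
    rw [foldl_set_same _ _ _ t (by simpa using ht)]
    rw [getD_map_range' _ _ _ _ (by omega)]
    rw [set_map_range]
    apply List.map_congr_left
    intro i hi
    simp only [List.mem_range] at hi
    by_cases hit : i = t
    · subst hit
      simp only [if_pos (Nat.lt_succ_self i), if_true, if_neg (lt_irrefl i), List.nil_append]
      apply List.map_congr_left
      intro a _
      simp only [PySem.List.pyGetD_natCast]
    · have : (i < t) = (i < t + 1) := by
        apply propext; constructor <;> intro <;> omega
      simp [hit, ← this]


theorem stepRowA_char (arr : List (List Int)) (cols : Nat) :
    stepRowA arr arr.length cols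
      = (List.range arr.length).map (fun i =>
          (List.range (cols / 2)).map (fun j =>
            max ((arr.getD i []).getD (2 * j) 0) ((arr.getD i []).getD (2 * j + 1) 0))) := by
  unfold stepRowA
  rw [stepRow_outer arr cols arr.length le_rfl]
  apply List.map_congr_left
  intro i hi
  simp only [List.mem_range] at hi
  simp [hi]

theorem stepCol_outer (arr : List (List Int)) (rows t : Nat) :
    (List.range t).foldl (fun ans (i : Nat) =>
      (List.range (rows / 2)).foldl (fun ans j =>
        ans.set j ((ans.getD j []) ++
          [min (PySem.List.pyGetD (PySem.List.pyGetD arr ((2 * j : Nat) : Int) []) (i : Int) 0)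
               (PySem.List.pyGetD (PySem.List.pyGetD arr ((2 * j + 1 : Nat) : Int) []) (i : Int) 0)])) ans)
      ((List.range (rows / 2)).map (fun _ => []))
    = (List.range (rows / 2)).map (fun j => (List.range t).map (fun i =>
        min ((arr.getD (2 * j) []).getD i 0) ((arr.getD (2 * j + 1) []).getD i 0))) := by
  induction t with
  | zero => simp
  | succ t ih =>
    rw [List.range_succ, List.foldl_append, ih, List.foldl_cons, List.foldl_nil]
    rw [foldl_set_each (rows / 2)
      (fun j => min (PySem.List.pyGetD (PySem.List.pyGetD arr ((2 * j : Nat) : Int) []) (t : Int) 0)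
                    (PySem.List.pyGetD (PySem.List.pyGetD arr ((2 * j + 1 : Nat) : Int) []) (t : Int) 0))]
    apply List.map_congr_left
    intro j _
    rw [List.map_append]
    simp only [List.map_cons, List.map_nil, PySem.List.pyGetD_natCast]

theorem stepColA_char (arr : List (List Int)) (rows cols : Nat) :
    stepColA arr rows cols
      = (List.range (rows / 2)).map (fun j =>
          (List.range cols).map (fun i =>
            min ((arr.getD (2 * j) []).getD i 0) ((arr.getD (2 * j + 1) []).getD i 0))) := by
  unfold stepColA
  exact stepCol_outer arr rows cols

def Rect (arr : List (List Int)) : Prop :=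
  (∀ row ∈ arr, row.length = (arr.headD []).length) ∧ 1 ≤ (arr.headD []).length

theorem rect_of_all (l : List (List Int)) (c : Nat) (hne : l ≠ [])
    (h : ∀ row ∈ l, row.length = c) (hc : 1 ≤ c) : Rect l := by
  have hh : l.headD [] ∈ l := by
    cases l with
    | nil => exact absurd rfl hne
    | cons a t => simp
  have hhl : (l.headD []).length = c := h _ hh
  exact ⟨fun row hr => by rw [h row hr, hhl], by omega⟩

theorem pyGetD_zero_headD (arr : List (List Int)) :
    PySem.List.pyGetD arr 0 [] = arr.headD [] := by
  cases arr <;> simp [PySem.List.pyGetD_zero, List.getD]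

theorem loop_eq (fuel : Nat) : ∀ (arr : List (List Int)) (k : Int), arr ≠ [] →
    (k = 0 ∨ Rect arr) → solutionFuel fuel arr k = solutionAltFuel fuel arr k := by
  induction fuel with
  | zero => intro arr k _ _; rfl
  | succ fuel ih =>
    intro arr k hne hpre
    simp only [solutionFuel, solutionAltFuel]
    by_cases hk : k = 0
    · simp [hk]
    · have hrect : Rect arr := hpre.resolve_left hk
      have hcols : (PySem.List.pyGetD arr 0 []).length = (arr.headD []).length := by
        rw [pyGetD_zero_headD]
      set cols := (PySem.List.pyGetD arr 0 []).length with hcdef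
      have hrows1 : 1 ≤ arr.length := List.length_pos_iff.mpr hne
      have hc1 : 1 ≤ cols := hcols ▸ hrect.2
      have hrowlen : ∀ row ∈ arr, row.length = cols := fun row hr => by
        rw [hrect.1 row hr, hcols]
      by_cases hb : cols = 1 ∧ arr.length = 1
      · simp [hk, hb]
      · simp only [if_neg hk, if_neg hb, if_neg (by tauto : ¬(k = 0 ∨ cols = 1 ∧ arr.length = 1))]
        by_cases hcr : cols ≥ arr.length
        · -- row branch
          have hc2 : 2 ≤ cols := by
            by_contra h
            have hcol1 : cols = 1 := by omega
            have hlen1 : arr.length = 1 := by omega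
            exact hb ⟨hcol1, hlen1⟩
          have key : stepRowA arr arr.length cols
              = arr.map (fun row => pairwise (fun a b => max a b) row) := by
            rw [stepRowA_char]
            conv_rhs => rw [← list_eq_map_range [] arr]
            rw [List.map_map]
            apply List.map_congr_left
            intro i hi
            simp only [List.mem_range] at hi
            simp only [Function.comp]
            rw [pairwise_eq_map_range (fun a b => max a b) 0 (arr.getD i [])]
            rw [hrowlen _ (getD_mem' arr i [] hi)]
          rw [if_pos hcr, if_pos hcr, key]
          apply ih
          · simp only [ne_eq, List.map_eq_nil_iff]
            exact hne
          · right
            apply rect_of_all _ (cols / 2)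
            · simp only [ne_eq, List.map_eq_nil_iff]
              exact hne
            · intro row hr
              simp only [List.mem_map] at hr
              obtain ⟨orig, ho, hrw⟩ := hr
              rw [← hrw, pairwise_length _ 0, hrowlen _ ho]
            · omega
        · -- column branch
          have hr2 : 2 ≤ arr.length := by omega
          have key : stepColA arr arr.length cols
              = pairwise (fun r0 r1 => List.zipWith (fun a b => min a b) r0 r1) arr := by
            rw [stepColA_char]
            rw [pairwise_eq_map_range (fun r0 r1 => List.zipWith (fun a b => min a b) r0 r1) [] arr]
            apply List.map_congr_left
            intro j hj
            simp only [List.mem_range] at hj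
            rw [zipWith_eq_map_range _ _ _ cols
              (hrowlen _ (getD_mem' arr (2 * j) [] (by omega)))
              (hrowlen _ (getD_mem' arr (2 * j + 1) [] (by omega)))]
          rw [if_neg hcr, if_neg hcr, key]
          apply ih
          · intro hnil
            have hlen := congrArg List.length hnil
            rw [pairwise_length _ [] arr] at hlen
            simp only [List.length_nil] at hlen
            omega
          · right
            apply rect_of_all _ cols
            · intro hnil
              have hlen2 := congrArg List.length hnil
              rw [pairwise_length _ [] arr] at hlen2
              simp only [List.length_nil] at hlen2
              omega
            · intro row hr
              rw [pairwise_eq_map_range _ [] arr] at hr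
              simp only [List.mem_map, List.mem_range] at hr
              obtain ⟨j, hj, hrw⟩ := hr
              rw [← hrw, List.length_zipWith,
                hrowlen _ (getD_mem' arr (2 * j) [] (by omega)),
                hrowlen _ (getD_mem' arr (2 * j + 1) [] (by omega))]
              omega
            · omega

-- ===== VERDICT (by name: the statement is the Claim_ definition above) =====
theorem solution_spec : Claim_equal_solution := by
  intro arr k _ hpre
  unfold Spec_solution solution solution_alt
  exact loop_eq _ arr k hpre.1 (hpre.2.imp id (fun h => h))
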